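-- pv_equiv track=rewrite | github.com/anya-pich/advent_of_code_2023 | day05/script.py | parse_almanac
-- ===== SOURCE A (Python) =====
-- def parse_almanac(lines):
--     steps = []
--     step = []
--     i = 3
--     while i < len(lines):
--         content = lines[i].strip()
--         if not content:
--             steps.append(sorted(step, key=lambda x: x[0]))
--             step = []
--             i += 2
--             continue
--         destination, source, range_length = [int(num) for num in content.split()]
--         step.append((source, source + range_length - 1, destination - source))
--         i += 1
--     steps.append(sorted(step, key=lambda x: x[0]))
--     return steps
-- ===== SOURCE B (Python) =====
-- def parse_almanac(lines):
--     def parse_row(content):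
--         destination, source, range_length = map(int, content.split())
--         return (source, source + range_length - 1, destination - source)
--
--     # Work on the stripped tail; cut it into segments at each blank line,
--     # dropping the line right after the blank (the map header) with it.
--     tail = [line.strip() for line in lines[3:]]
--     segments = []
--     while True:
--         cut = next((j for j, l in enumerate(tail) if not l), None)
--         if cut is None:
--             segments.append(tail)
--             break
--         segments.append(tail[:cut])
--         tail = tail[cut + 2:]
--     return [sorted(map(parse_row, seg), key=lambda t: t[0]) for seg in segments]
-- ===== Notes on version B (the rewrite author's own statement) =====
-- stated objective: alternative
-- what changed: Replaces A's single index-walk with mutable step/steps accumulators and i+=1/i+=2 stepping by a two-phase decomposition: strip the tail once, cut it into blank-separated segments (dropping the header line after each blank), then parse and sort each segment wholesale in a comprehension.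
import Mathlib
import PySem

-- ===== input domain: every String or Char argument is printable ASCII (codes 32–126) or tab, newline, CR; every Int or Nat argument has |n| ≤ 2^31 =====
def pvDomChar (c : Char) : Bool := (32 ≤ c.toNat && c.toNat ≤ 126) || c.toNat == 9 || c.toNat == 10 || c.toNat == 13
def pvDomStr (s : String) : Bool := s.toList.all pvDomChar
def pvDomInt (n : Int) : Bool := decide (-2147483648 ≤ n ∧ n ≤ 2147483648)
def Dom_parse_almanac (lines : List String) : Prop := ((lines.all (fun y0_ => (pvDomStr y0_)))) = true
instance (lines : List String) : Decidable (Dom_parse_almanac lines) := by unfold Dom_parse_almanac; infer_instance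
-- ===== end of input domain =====

-- B re-decomposes A's index walk as: strip the tail once, cut it into blank-separated
-- segments (dropping the header line after each blank), parse+sort each segment whole.
-- Objective: alternative decomposition (same asymptotic cost).

-- ===== PORT A =====
-- shared row parser: (d, s, r) tokens of an already-stripped line ↦ (s, s+r-1, d-s);
-- the `_ => (0,0,0)` default is unreachable under Pre_ (Python raises ValueError there)
def pvRow (content : String) : Int × Int × Int :=
  match (PySem.Str.split₀ content).map PySem.Int.ofStr? with
  | [some d, some s, some r] => (s, s + r - 1, d - s)
  | _ => (0, 0, 0)

def pvSortStep (step : List (Int × Int × Int)) : List (Int × Int × Int) :=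
  PySem.List.sorted step (fun x => x.1) false

-- A's while-loop: rest = lines[i:], `i += 2` after a blank = drop the next line too
def pvLoopA (rest : List String) (step : List (Int × Int × Int))
    (steps : List (List (Int × Int × Int))) : List (List (Int × Int × Int)) :=
  match rest with
  | [] => steps ++ [pvSortStep step]
  | l :: rs =>
    let content := PySem.Str.strip l
    if content = "" then pvLoopA (rs.drop 1) [] (steps ++ [pvSortStep step])
    else pvLoopA rs (step ++ [pvRow content]) steps
termination_by rest.length
decreasing_by all_goals simp

def parse_almanac (lines : List String) : List (List (Int × Int × Int)) :=
  pvLoopA (lines.drop 3) [] []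

-- ===== PORT B =====
-- cut the stripped tail at each first blank line, dropping the blank and the header after it
def pvSegs (tail : List String) (segs : List (List String)) : List (List String) :=
  match h : tail.findIdx? (fun l => decide (l = "")) with
  | none => segs ++ [tail]
  | some j => pvSegs (tail.drop (j + 2)) (segs ++ [tail.take j])
termination_by tail.length
decreasing_by
  have := List.findIdx?_eq_some_iff_findIdx_eq.mp h
  simp; omega

def parse_almanac_alt (lines : List String) : List (List (Int × Int × Int)) :=
  (pvSegs ((lines.drop 3).map PySem.Str.strip) []).map
    (fun seg => pvSortStep (seg.map pvRow))

-- ===== PRECONDITION & SPEC =====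
def pvGoodRow (content : String) : Bool :=
  match (PySem.Str.split₀ content).map PySem.Int.ofStr? with
  | [some _, some _, some _] => true
  | _ => false

-- the line-grammar A's walk accepts: data rows until a blank, then one skipped line, repeat
def pvPreOk : List String → Bool
  | [] => true
  | l :: rs =>
    if PySem.Str.strip l = "" then
      match rs with          -- skip the header line after the blank (A's `i += 2`)
      | [] => true
      | _ :: rs' => pvPreOk rs'
    else pvGoodRow (PySem.Str.strip l) && pvPreOk rs

-- Pre_ holds exactly where Python A returns: every line its walk parses must be
-- three int() tokens (else Python raises ValueError)
def Pre_parse_almanac (lines : List String) : Prop := pvPreOk (lines.drop 3) = true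
instance (lines : List String) : Decidable (Pre_parse_almanac lines) := by
  unfold Pre_parse_almanac; infer_instance

def pvWitness_parse_almanac : List String :=
  ["seeds: 79 14", "", "seed-to-soil map:", "50 98 2", "52 50 48", "",
   "soil-to-fertilizer map:", "0 15 37", "39 0 15"]

def Spec_parse_almanac (lines : List String) (out : List (List (Int × Int × Int))) : Prop := out = parse_almanac_alt lines
instance (lines : List String) (out : List (List (Int × Int × Int))) : Decidable (Spec_parse_almanac lines out) := by unfold Spec_parse_almanac; infer_instance

-- ===== CLAIM (what is proved, stated in full; the proofs are below) =====
def Claim_equal_parse_almanac : Prop := ∀ (lines : List String), Dom_parse_almanac lines → Pre_parse_almanac lines → Spec_parse_almanac lines (parse_almanac lines)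

-- ===== LEMMAS AND PROOFS =====

-- proof-side, non-accumulator view of pvSegs: (first segment, remaining segments)
def pvSegsP (t : List String) : List String × List (List String) :=
  match h : t.findIdx? (fun l => decide (l = "")) with
  | none => (t, [])
  | some j =>
    let p := pvSegsP (t.drop (j + 2))
    (t.take j, p.1 :: p.2)
termination_by t.length
decreasing_by
  have := List.findIdx?_eq_some_iff_findIdx_eq.mp h
  simp; omega

theorem pvSegsP_nil : pvSegsP [] = ([], []) := by
  rw [pvSegsP.eq_def]; simp

theorem pvSegsP_cons_blank (t : List String) :
    pvSegsP ("" :: t) = ([], (pvSegsP (t.drop 1)).1 :: (pvSegsP (t.drop 1)).2) := by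
  have hc : List.findIdx? (fun l => decide (l = "")) ("" :: t) = some 0 := by
    simp [List.findIdx?_cons]
  rw [pvSegsP.eq_def]
  split
  · simp_all
  · rename_i j h; rw [hc] at h; cases h; simp

theorem pvSegsP_cons_nonblank (x : String) (t : List String) (hx : x ≠ "") :
    pvSegsP (x :: t) = (x :: (pvSegsP t).1, (pvSegsP t).2) := by
  have hc : List.findIdx? (fun l => decide (l = "")) (x :: t) =
      (List.findIdx? (fun l => decide (l = "")) t).map (· + 1) := by
    simp [List.findIdx?_cons, hx]
  rw [pvSegsP.eq_def, pvSegsP.eq_def (t := t)]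
  split <;> rename_i h1 <;> rw [hc] at h1 <;> split <;> rename_i h2 <;> rw [h2] at h1
  all_goals try (exfalso; simp at h1; done)
  all_goals try (simp only [Option.map_some] at h1; cases h1)
  all_goals rfl

theorem pvSegs_eq (t : List String) (segs : List (List String)) :
    pvSegs t segs = segs ++ (pvSegsP t).1 :: (pvSegsP t).2 := by
  induction t, segs using pvSegs.induct with
  | case1 t segs h =>
    rw [pvSegs.eq_def, pvSegsP.eq_def]
    split <;> rename_i h1 <;> rw [h] at h1
    all_goals (exfalso; simp at h1)
  | case2 t segs j h ih =>
    rw [pvSegs.eq_def, pvSegsP.eq_def]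
    split <;> rename_i h1 <;> rw [h] at h1
    cases h1
    rw [ih]
    simp

theorem pvLoopA_eq (n : Nat) : ∀ (rest : List String), rest.length ≤ n →
    ∀ (step : List (Int × Int × Int)) (acc : List (List (Int × Int × Int))),
    pvLoopA rest step acc =
      acc ++ pvSortStep (step ++ (pvSegsP (rest.map PySem.Str.strip)).1.map pvRow)
          :: (pvSegsP (rest.map PySem.Str.strip)).2.map (fun seg => pvSortStep (seg.map pvRow)) := by
  induction n with
  | zero =>
    intro rest hlen step acc
    have : rest = [] := List.eq_nil_of_length_eq_zero (Nat.le_zero.mp hlen)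
    subst this
    rw [pvLoopA.eq_def]
    simp [pvSegsP_nil]
  | succ n ih =>
    intro rest hlen step acc
    cases rest with
    | nil =>
      rw [pvLoopA.eq_def]
      simp [pvSegsP_nil]
    | cons l rs =>
      rw [pvLoopA.eq_def]
      simp only [List.map_cons]
      by_cases hb : PySem.Str.strip l = ""
      · rw [if_pos hb, hb, pvSegsP_cons_blank]
        rw [ih (rs.drop 1) (by simp at hlen ⊢; omega) [] (acc ++ [pvSortStep step])]
        simp [← List.map_drop]
      · rw [if_neg hb, pvSegsP_cons_nonblank _ _ hb]
        rw [ih rs (by simp at hlen; omega) (step ++ [pvRow (PySem.Str.strip l)]) acc]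
        simp

-- ===== VERDICT (by name: the statement is the Claim_ definition above) =====
theorem parse_almanac_spec : Claim_equal_parse_almanac := by
  intro lines _ _
  unfold Spec_parse_almanac parse_almanac parse_almanac_alt
  rw [pvLoopA_eq (lines.drop 3).length (lines.drop 3) le_rfl [] [],
      pvSegs_eq]
  simp
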